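-- pv_equiv track=rewrite | github.com/lastHunter956/NLP-5029 | courseNLP/examples/logic/text_processing.py | _apply_negation_window
-- ===== SOURCE A (Python) =====
-- _NEG_STOP: frozenset = frozenset({
--     'y', 'pero', 'sin', 'embargo', 'aunque', 'que', 'porque',
--     'o', 'ni', 'sino', 'a', ',', '.', '!', '?',
-- })
--
-- def _apply_negation_window(tokens: list, window: int = 4) -> list:
--     """Propaga negación hasta ``window`` tokens o hasta un stop-token.
--
--     Ejemplo:
--         ["no", "creo", "que", "sea", "bueno"] → window=4
--         → ["no", "neg_creo", "que", "sea", "neg_bueno"]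
--         (se detiene en 'que' que es _NEG_STOP)
--
--     Los clíticos pronominales ya se compoundearon en el paso anterior
--     (no_me, no_te, etc.), así que aquí solo se propaga sobre palabras
--     de contenido.
--     """
--     result = list(tokens)
--     i = 0
--     while i < len(tokens):
--         tok = tokens[i].lower()
--         if tok in ('no', 'nunca', 'jamas', 'tampoco', 'nadie', 'nada', 'ningun', 'ninguna'):
--             count = 0
--             j = i + 1
--             while j < len(tokens) and count < window:
--                 if tokens[j].lower() in _NEG_STOP:
--                     break
--                 # Marcar token negado solo si no está ya compoundeado
--                 if '_' not in tokens[j]: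
--                     result[j] = 'neg_' + tokens[j]
--                 count += 1
--                 j += 1
--         i += 1
--     return result
-- ===== SOURCE B (Python) =====
-- _NEG_STOP: frozenset = frozenset({
--     'y', 'pero', 'sin', 'embargo', 'aunque', 'que', 'porque',
--     'o', 'ni', 'sino', 'a', ',', '.', '!', '?',
-- })
--
-- _NEG_TRIGGERS = ('no', 'nunca', 'jamas', 'tampoco', 'nadie', 'nada', 'ningun', 'ninguna')
--
--
-- def _apply_negation_window(tokens: list, window: int = 4) -> list:
--     """Single linear pass: an integer countdown of tokens still inside a
--     negation window replaces the nested trigger-rescan of the original."""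
--     result = []
--     remaining = 0
--     for tok in tokens:
--         low = tok.lower()
--         if low in _NEG_STOP:
--             remaining = 0
--             result.append(tok)
--         elif remaining > 0:
--             result.append(tok if '_' in tok else 'neg_' + tok)
--             remaining -= 1
--         else:
--             result.append(tok)
--         if low in _NEG_TRIGGERS:
--             remaining = window
--     return result
-- ===== Notes on version B (the rewrite author's own statement) =====
-- stated objective: alternative
-- what changed: Replaces the nested loops (for each trigger, rescan up to `window` following tokens) by one linear pass that carries an integer countdown of tokens still inside a negation window, marking/decrementing before re-arming on a trigger.
import Mathlib
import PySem

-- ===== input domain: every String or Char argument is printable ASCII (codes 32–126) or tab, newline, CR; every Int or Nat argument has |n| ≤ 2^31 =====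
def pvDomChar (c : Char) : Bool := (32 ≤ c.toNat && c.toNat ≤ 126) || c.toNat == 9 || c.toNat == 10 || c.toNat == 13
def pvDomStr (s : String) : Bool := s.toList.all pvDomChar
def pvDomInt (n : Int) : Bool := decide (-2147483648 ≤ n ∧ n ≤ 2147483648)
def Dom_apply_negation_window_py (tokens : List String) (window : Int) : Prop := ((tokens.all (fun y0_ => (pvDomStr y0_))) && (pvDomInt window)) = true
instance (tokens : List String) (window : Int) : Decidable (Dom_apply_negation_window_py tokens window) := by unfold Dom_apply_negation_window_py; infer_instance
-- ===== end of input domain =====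

-- B replaces A's nested trigger-rescan loops with one linear pass carrying an integer countdown of still-negated tokens (objective: alternative decomposition).

-- ===== PORT A =====
def pvNegStop : List String := ["y","pero","sin","embargo","aunque","que","porque","o","ni","sino","a",",",".","!","?"]
def pvNegTriggers : List String := ["no","nunca","jamas","tampoco","nadie","nada","ningun","ninguna"]

def pvAInner (tokens : List String) (window : Int) (result : List String) (count : Int) (j : Nat) : List String :=
  if _h : j < tokens.length ∧ count < window then
    if (PySem.Str.lower (tokens.getD j "")) ∈ pvNegStop then result
    else
      pvAInner tokens window
        (if PySem.Str.isIn "_" (tokens.getD j "") then result else result.set j ("neg_" ++ tokens.getD j ""))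
        (count + 1) (j + 1)
  else result
termination_by tokens.length - j
decreasing_by omega

def pvAOuter (tokens : List String) (window : Int) (result : List String) (i : Nat) : List String :=
  if _h : i < tokens.length then
    pvAOuter tokens window
      (if (PySem.Str.lower (tokens.getD i "")) ∈ pvNegTriggers then pvAInner tokens window result 0 (i + 1) else result)
      (i + 1)
  else result
termination_by tokens.length - i
decreasing_by omega

def apply_negation_window_py (tokens : List String) (window : Int) : List String :=
  pvAOuter tokens window tokens 0

-- ===== PORT B =====
def pvBGo (window : Int) (toks : List String) (remaining : Int) : List String :=
  match toks with
  | [] => []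
  | tok :: rest =>
    let low := PySem.Str.lower tok
    let step : String × Int :=
      if low ∈ pvNegStop then (tok, (0 : Int))
      else if remaining > 0 then
        ((if PySem.Str.isIn "_" tok then tok else "neg_" ++ tok), remaining - 1)
      else (tok, remaining)
    step.1 :: pvBGo window rest (if low ∈ pvNegTriggers then window else step.2)

def apply_negation_window_py_alt (tokens : List String) (window : Int) : List String :=
  pvBGo window tokens 0

-- ===== PRECONDITION & SPEC =====
def Spec_apply_negation_window_py (tokens : List String) (window : Int) (out : List String) : Prop := out = apply_negation_window_py_alt tokens window
instance (tokens : List String) (window : Int) (out : List String) : Decidable (Spec_apply_negation_window_py tokens window out) := by unfold Spec_apply_negation_window_py; infer_instance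

-- ===== CLAIM (what is proved, stated in full; the proofs are below) =====
def Claim_equal_apply_negation_window_py : Prop := ∀ (tokens : List String) (window : Int), Dom_apply_negation_window_py tokens window → Spec_apply_negation_window_py tokens window (apply_negation_window_py tokens window)

-- ===== LEMMAS AND PROOFS =====

-- token classifiers and the common marking specification
def pvStop (tokens : List String) (k : Nat) : Bool := decide (PySem.Str.lower (tokens.getD k "") ∈ pvNegStop)
def pvTrig (tokens : List String) (k : Nat) : Bool := decide (PySem.Str.lower (tokens.getD k "") ∈ pvNegTriggers)
def pvNU (tokens : List String) (p : Nat) : Bool := !(PySem.Str.isIn "_" (tokens.getD p ""))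

-- p gets marked iff some trigger i < p reaches p (within window, no stop token in (i, p])
def pvMarkFinal (tokens : List String) (window : Int) (p : Nat) : Bool :=
  decide (∃ i < p, pvTrig tokens i = true ∧ (p : Int) ≤ i + window ∧ ∀ k < p + 1, i < k → pvStop tokens k = false)

-- mark predicate after the outer loop has handled triggers at positions < m
def pvMarkA (tokens : List String) (window : Int) (m p : Nat) : Bool :=
  decide (∃ i < m, i < p ∧ pvTrig tokens i = true ∧ (p : Int) ≤ i + window ∧ ∀ k < p + 1, i < k → pvStop tokens k = false)

-- marks produced by one inner loop started at j with counter c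
def pvMarkI (tokens : List String) (window : Int) (c : Int) (j p : Nat) : Bool :=
  decide (j ≤ p ∧ c + ((p : Int) - j) < window ∧ ∀ k < p + 1, j ≤ k → pvStop tokens k = false)

-- mark predicate of the single pass with current countdown r
def pvMarkB (tokens : List String) (window : Int) (r : Int) (q : Nat) : Bool :=
  decide (pvStop tokens q = false ∧
    (((q : Int) < r ∧ ∀ k < q, pvStop tokens k = false) ∨
     (∃ i < q, pvTrig tokens i = true ∧ (q : Int) ≤ i + window ∧ ∀ k < q, i < k → pvStop tokens k = false)))

def pvEntry (tokens : List String) (mark : Nat → Bool) (p : Nat) : String :=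
  if mark p && pvNU tokens p then "neg_" ++ tokens.getD p "" else tokens.getD p ""

lemma pv_self_eq_map_range (res : List String) :
    res = (List.range res.length).map (fun p => res.getD p "") := by
  apply List.ext_getElem (by simp)
  intro p h1 h2
  simp [List.getD_eq_getElem?_getD, List.getElem?_eq_getElem, h1]

lemma pv_getD_map_range (f : Nat → String) (n p : Nat) (hp : p < n) :
    ((List.range n).map f).getD p "" = f p := by
  simp [List.getD_eq_getElem?_getD, List.getElem?_map, List.getElem?_range, hp]

lemma pvMarkI_lt (t : List String) (w c : Int) (j p : Nat) (hp : p < j) :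
    pvMarkI t w c j p = false := by
  simp only [pvMarkI, decide_eq_false_iff_not]
  rintro ⟨h1, -, -⟩; omega

lemma pvMarkI_win (t : List String) (w c : Int) (j p : Nat) (hc : w ≤ c) :
    pvMarkI t w c j p = false := by
  simp only [pvMarkI, decide_eq_false_iff_not]
  rintro ⟨h1, h2, -⟩; omega

lemma pvMarkI_stop (t : List String) (w c : Int) (j p : Nat) (hs : pvStop t j = true) (hjp : j ≤ p) :
    pvMarkI t w c j p = false := by
  simp only [pvMarkI, decide_eq_false_iff_not]
  rintro ⟨h1, -, h3⟩
  have := h3 j (by omega) le_rfl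
  simp [hs] at this

lemma pvMarkI_self (t : List String) (w c : Int) (j : Nat) (hc : c < w) (hs : pvStop t j = false) :
    pvMarkI t w c j j = true := by
  simp only [pvMarkI, decide_eq_true_eq]
  refine ⟨le_rfl, by omega, fun k hk hjk => ?_⟩
  have : k = j := by omega
  subst this; exact hs

lemma pvMarkI_succ (t : List String) (w c : Int) (j p : Nat) (hjp : j < p) (hs : pvStop t j = false) :
    pvMarkI t w (c + 1) (j + 1) p = pvMarkI t w c j p := by
  simp only [pvMarkI, decide_eq_decide]
  constructor
  · rintro ⟨h1, h2, h3⟩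
    refine ⟨by omega, by push_cast at h2 ⊢; omega, fun k hk hjk => ?_⟩
    rcases Nat.eq_or_lt_of_le hjk with h | h
    · subst h; exact hs
    · exact h3 k hk (by omega)
  · rintro ⟨h1, h2, h3⟩
    exact ⟨by omega, by push_cast at h2 ⊢; omega, fun k hk hjk => h3 k hk (by omega)⟩

lemma pvAInner_eq (tokens : List String) (window : Int) (res : List String) (c : Int) (j : Nat) :
    res.length = tokens.length →
    pvAInner tokens window res c j =
      (List.range tokens.length).map
        (fun p => if pvMarkI tokens window c j p && pvNU tokens p
                  then "neg_" ++ tokens.getD p "" else res.getD p "") := by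
  induction res, c, j using pvAInner.induct tokens window with
  | case1 res c j h hstop =>
    intro hlen
    rw [pvAInner, dif_pos h, if_pos hstop]
    conv_lhs => rw [pv_self_eq_map_range res, hlen]
    apply List.map_congr_left
    intro p hp
    rcases Nat.lt_or_ge p j with hpj | hpj
    · rw [pvMarkI_lt tokens window c j p hpj]; simp
    · rw [pvMarkI_stop tokens window c j p (by simp only [pvStop]; exact decide_eq_true hstop) hpj]; simp
  | case2 res c j h hstop ih =>
    intro hlen
    rw [pvAInner, dif_pos h, if_neg hstop]
    have hlen' : (if PySem.Str.isIn "_" (tokens.getD j "") then res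
        else res.set j ("neg_" ++ tokens.getD j "")).length = tokens.length := by
      split_ifs <;> simp [hlen]
    simp only [dite_eq_ite] at ih
    rw [ih hlen']
    apply List.map_congr_left
    intro p hp
    simp only [List.mem_range] at hp
    have hstop' : pvStop tokens j = false := by
      simp only [pvStop]; exact decide_eq_false hstop
    rcases lt_trichotomy p j with hpj | hpj | hpj
    · rw [pvMarkI_lt tokens window (c + 1) (j + 1) p (by omega),
        pvMarkI_lt tokens window c j p hpj]
      simp only [Bool.false_and]
      rw [if_neg Bool.false_ne_true, if_neg Bool.false_ne_true]
      split_ifs with hu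
      · rfl
      · simp only [List.getD_eq_getElem?_getD]
        rw [List.getElem?_set_ne (by omega)]
    · subst hpj
      rw [pvMarkI_lt tokens window (c + 1) (p + 1) p (by omega),
        pvMarkI_self tokens window c p h.2 hstop']
      simp only [Bool.false_and, Bool.true_and]
      rw [if_neg Bool.false_ne_true]
      by_cases hu : PySem.Str.isIn "_" (tokens.getD p "") = true
      · rw [if_pos hu]
        have hnu : pvNU tokens p = false := by simp only [pvNU, hu, Bool.not_true]
        rw [hnu, if_neg Bool.false_ne_true]
      · rw [if_neg hu]
        have hu' : PySem.Str.isIn "_" (tokens.getD p "") = false := by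
          revert hu; cases PySem.Str.isIn "_" (tokens.getD p "") <;> simp
        have hnu : pvNU tokens p = true := by simp only [pvNU, hu', Bool.not_false]
        rw [hnu, if_pos rfl]
        simp only [List.getD_eq_getElem?_getD]
        rw [List.getElem?_set_self (by omega : p < res.length)]
        rfl
    · rw [pvMarkI_succ tokens window c j p hpj hstop']
      split_ifs with hu hv
      · rfl
      · rfl
      · simp only [List.getD_eq_getElem?_getD]
        rw [List.getElem?_set_ne (by omega)]
  | case3 res c j h =>
    intro hlen
    rw [pvAInner, dif_neg h]
    conv_lhs => rw [pv_self_eq_map_range res, hlen]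
    apply List.map_congr_left
    intro p hp
    simp only [List.mem_range] at hp
    rcases not_and_or.mp h with h' | h'
    · rw [pvMarkI_lt tokens window c j p (by omega)]; simp
    · rw [pvMarkI_win tokens window c j p (by omega)]; simp


lemma pvMarkA_zero (t : List String) (w : Int) (p : Nat) : pvMarkA t w 0 p = false := by
  simp [pvMarkA]

lemma pvMarkA_ge (t : List String) (w : Int) (i p : Nat) (hp : p ≤ i) :
    pvMarkA t w i p = pvMarkFinal t w p := by
  simp only [pvMarkA, pvMarkFinal, decide_eq_decide]
  constructor
  · rintro ⟨i', -, hip, ht, hw, hks⟩; exact ⟨i', hip, ht, hw, hks⟩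
  · rintro ⟨i', hip, ht, hw, hks⟩; exact ⟨i', by omega, hip, ht, hw, hks⟩

lemma pvMarkA_succ_notrig (t : List String) (w : Int) (i p : Nat) (ht : pvTrig t i = false) :
    pvMarkA t w (i + 1) p = pvMarkA t w i p := by
  simp only [pvMarkA, decide_eq_decide]
  constructor
  · rintro ⟨i', hi, rest⟩
    rcases Nat.lt_succ_iff_lt_or_eq.mp hi with h' | h'
    · exact ⟨i', h', rest⟩
    · subst h'; rcases rest with ⟨-, ht', -⟩; simp [ht] at ht'
  · rintro ⟨i', hi, rest⟩; exact ⟨i', by omega, rest⟩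

lemma pvMarkA_succ_trig (t : List String) (w : Int) (i p : Nat) (ht : pvTrig t i = true) :
    pvMarkA t w (i + 1) p = (pvMarkA t w i p || pvMarkI t w 0 (i + 1) p) := by
  rw [Bool.eq_iff_iff]
  simp only [pvMarkA, pvMarkI, Bool.or_eq_true, decide_eq_true_eq]
  constructor
  · rintro ⟨i', hi, hip, ht', hw, hks⟩
    rcases Nat.lt_succ_iff_lt_or_eq.mp hi with h' | h'
    · exact Or.inl ⟨i', h', hip, ht', hw, hks⟩
    · subst h'
      exact Or.inr ⟨by omega, by push_cast at hw ⊢; omega, fun k hk hik => hks k hk (by omega)⟩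
  · rintro (⟨i', hi, rest⟩ | ⟨h1, h2, h3⟩)
    · exact ⟨i', by omega, rest⟩
    · exact ⟨i, by omega, by omega, ht, by push_cast at h2 ⊢; omega,
        fun k hk hik => h3 k hk (by omega)⟩

lemma pvMarkB_zero (t : List String) (w : Int) (q : Nat) :
    pvMarkB t w 0 q = pvMarkFinal t w q := by
  simp only [pvMarkB, pvMarkFinal, decide_eq_decide]
  constructor
  · rintro ⟨hq, ⟨hlt, -⟩ | ⟨i, hip, ht, hw, hks⟩⟩
    · omega
    · refine ⟨i, hip, ht, hw, fun k hk hik => ?_⟩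
      rcases Nat.lt_succ_iff_lt_or_eq.mp hk with h' | h'
      · exact hks k h' hik
      · subst h'; exact hq
  · rintro ⟨i, hip, ht, hw, hks⟩
    exact ⟨hks q (by omega) hip, Or.inr ⟨i, hip, ht, hw, fun k hk hik => hks k (by omega) hik⟩⟩

lemma pvAOuter_eq (tokens : List String) (window : Int) (res : List String) (i : Nat) :
    res = (List.range tokens.length).map (pvEntry tokens (pvMarkA tokens window i)) →
    pvAOuter tokens window res i =
      (List.range tokens.length).map (pvEntry tokens (pvMarkFinal tokens window)) := by
  induction res, i using pvAOuter.induct tokens window with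
  | case1 res i h ih =>
    intro hres
    rw [pvAOuter, dif_pos h]
    apply ih
    by_cases ht : PySem.Str.lower (tokens.getD i "") ∈ pvNegTriggers
    · rw [dif_pos ht]
      have hlen : res.length = tokens.length := by rw [hres]; simp
      rw [pvAInner_eq tokens window res 0 (i + 1) hlen]
      apply List.map_congr_left
      intro p hp
      simp only [List.mem_range] at hp
      rw [hres, pv_getD_map_range _ _ _ hp]
      simp only [pvEntry]
      rw [pvMarkA_succ_trig tokens window i p (by simp only [pvTrig]; exact decide_eq_true ht)]
      cases hmi : pvMarkI tokens window 0 (i + 1) p <;>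
        cases hma : pvMarkA tokens window i p <;>
        cases hnu : pvNU tokens p <;> simp
    · rw [dif_neg ht, hres]
      apply List.map_congr_left
      intro p _
      simp only [pvEntry]
      rw [pvMarkA_succ_notrig tokens window i p (by simp only [pvTrig]; exact decide_eq_false ht)]
  | case2 res i h =>
    intro hres
    rw [pvAOuter, dif_neg h, hres]
    apply List.map_congr_left
    intro p hp
    simp only [List.mem_range] at hp
    simp only [pvEntry]
    rw [pvMarkA_ge tokens window i p (by omega)]


-- scratch: B-side lemmas to be inserted
lemma pv_forall_lt_succ (P : Nat → Prop) (q : Nat) :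
    (∀ k < q + 1, P k) ↔ P 0 ∧ ∀ k < q, P (k + 1) := by
  constructor
  · intro h; exact ⟨h 0 (by omega), fun k hk => h (k + 1) (by omega)⟩
  · rintro ⟨h0, h⟩ k hk
    cases k with
    | zero => exact h0
    | succ k' => exact h k' (by omega)

lemma pv_exists_lt_succ (P : Nat → Prop) (q : Nat) :
    (∃ i, i < q + 1 ∧ P i) ↔ P 0 ∨ ∃ i, i < q ∧ P (i + 1) := by
  constructor
  · rintro ⟨i, hi, hp⟩
    cases i with
    | zero => exact Or.inl hp
    | succ i' => exact Or.inr ⟨i', by omega, hp⟩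
  · rintro (h0 | ⟨i, hi, hp⟩)
    · exact ⟨0, by omega, h0⟩
    · exact ⟨i + 1, by omega, hp⟩

lemma pvStop_cons_succ (t : String) (l : List String) (k : Nat) :
    pvStop (t :: l) (k + 1) = pvStop l k := by simp [pvStop]
lemma pvStop_cons_zero (t : String) (l : List String) :
    pvStop (t :: l) 0 = decide (PySem.Str.lower t ∈ pvNegStop) := by simp [pvStop]
lemma pvTrig_cons_succ (t : String) (l : List String) (k : Nat) :
    pvTrig (t :: l) (k + 1) = pvTrig l k := by simp [pvTrig]
lemma pvTrig_cons_zero (t : String) (l : List String) :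
    pvTrig (t :: l) 0 = decide (PySem.Str.lower t ∈ pvNegTriggers) := by simp [pvTrig]
lemma pvNU_cons_succ (t : String) (l : List String) (k : Nat) :
    pvNU (t :: l) (k + 1) = pvNU l k := by simp [pvNU]

lemma pv_disjoint (s : String) (h1 : s ∈ pvNegStop) (h2 : s ∈ pvNegTriggers) : False := by
  simp [pvNegStop] at h1
  rcases h1 with h|h|h|h|h|h|h|h|h|h|h|h|h|h|h <;> subst h <;> simp [pvNegTriggers] at h2

lemma pvMarkB_cons (t : String) (l : List String) (window r : Int) (q : Nat)
    (hr : r ≤ window ∨ r ≤ 0) :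
    pvMarkB (t :: l) window r (q + 1) =
      pvMarkB l window
        (if PySem.Str.lower t ∈ pvNegTriggers then window
         else if PySem.Str.lower t ∈ pvNegStop then 0
         else if r > 0 then r - 1 else r) q := by
  by_cases hs : PySem.Str.lower t ∈ pvNegStop
  · have htr : ¬ PySem.Str.lower t ∈ pvNegTriggers := fun h => pv_disjoint _ hs h
    simp only [hs, htr, if_true, if_false, pvMarkB, decide_eq_decide,
      pvStop_cons_succ, pv_forall_lt_succ, pv_exists_lt_succ,
      pvStop_cons_zero, pvTrig_cons_succ, pvTrig_cons_zero]
    constructor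
    · rintro ⟨hq, ⟨_, ⟨h0, _⟩⟩ | (⟨ht0, _⟩ | ⟨i, hi, ht, hw, hks⟩)⟩
      · simp [hs] at h0
      · simp [htr] at ht0
      · refine ⟨hq, Or.inr ⟨i, by omega, ht, by push_cast at hw ⊢; omega, ?_⟩⟩
        intro k hk hik; exact (hks.2 k hk (by omega))
    · rintro ⟨hq, ⟨h0, _⟩ | ⟨i, hi, ht, hw, hks⟩⟩
      · omega
      · refine ⟨hq, Or.inr (Or.inr ⟨i, by omega, ht, by push_cast at hw ⊢; omega, ?_⟩)⟩
        refine ⟨by simp [hs], fun k hk hik => hks k (by omega) (by omega)⟩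
  · by_cases htr : PySem.Str.lower t ∈ pvNegTriggers
    · simp only [hs, htr, if_true, if_false, pvMarkB, decide_eq_decide,
        pvStop_cons_succ, pv_forall_lt_succ, pv_exists_lt_succ,
        pvStop_cons_zero, pvTrig_cons_succ, pvTrig_cons_zero]
      constructor
      · rintro ⟨hq, ⟨hlt, ⟨_, hks⟩⟩ | (⟨_, hw, hks⟩ | ⟨i, hi, ht, hw, hks⟩)⟩
        · refine ⟨hq, Or.inl ⟨by omega, hks⟩⟩
        · exact ⟨hq, Or.inl ⟨by push_cast at hw ⊢; omega, fun k hk => hks.2 k hk (by omega)⟩⟩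
        · exact ⟨hq, Or.inr ⟨i, by omega, ht, by push_cast at hw ⊢; omega,
            fun k hk hik => hks.2 k hk (by omega)⟩⟩
      · rintro ⟨hq, ⟨hlt, hks⟩ | ⟨i, hi, ht, hw, hks⟩⟩
        · exact ⟨hq, Or.inr (Or.inl ⟨by simp [htr], by push_cast; omega,
            ⟨by simp [hs], fun k hk _ => hks k (by omega)⟩⟩)⟩
        · exact ⟨hq, Or.inr (Or.inr ⟨i, by omega, ht, by push_cast at hw ⊢; omega,
            ⟨by simp [hs], fun k hk hik => hks k (by omega) (by omega)⟩⟩)⟩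
    · simp only [hs, htr, if_true, if_false, pvMarkB, decide_eq_decide,
        pvStop_cons_succ, pv_forall_lt_succ, pv_exists_lt_succ,
        pvStop_cons_zero, pvTrig_cons_succ, pvTrig_cons_zero]
      by_cases hr0 : r > 0
      · simp only [hr0, if_true]
        constructor
        · rintro ⟨hq, ⟨hlt, ⟨_, hks⟩⟩ | (⟨ht0, _⟩ | ⟨i, hi, ht, hw, hks⟩)⟩
          · exact ⟨hq, Or.inl ⟨by omega, hks⟩⟩
          · simp [htr] at ht0
          · exact ⟨hq, Or.inr ⟨i, by omega, ht, by push_cast at hw ⊢; omega,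
              fun k hk hik => hks.2 k hk (by omega)⟩⟩
        · rintro ⟨hq, ⟨hlt, hks⟩ | ⟨i, hi, ht, hw, hks⟩⟩
          · exact ⟨hq, Or.inl ⟨by omega, ⟨by simp [hs], fun k hk => hks k (by omega)⟩⟩⟩
          · exact ⟨hq, Or.inr (Or.inr ⟨i, by omega, ht, by push_cast at hw ⊢; omega,
              ⟨by simp [hs], fun k hk hik => hks k (by omega) (by omega)⟩⟩)⟩
      · simp only [hr0, if_false]
        constructor
        · rintro ⟨hq, ⟨hlt, _⟩ | (⟨ht0, _⟩ | ⟨i, hi, ht, hw, hks⟩)⟩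
          · omega
          · simp [htr] at ht0
          · exact ⟨hq, Or.inr ⟨i, by omega, ht, by push_cast at hw ⊢; omega,
              fun k hk hik => hks.2 k hk (by omega)⟩⟩
        · rintro ⟨hq, ⟨hlt, _⟩ | ⟨i, hi, ht, hw, hks⟩⟩
          · omega
          · exact ⟨hq, Or.inr (Or.inr ⟨i, by omega, ht, by push_cast at hw ⊢; omega,
              ⟨by simp [hs], fun k hk hik => hks k (by omega) (by omega)⟩⟩)⟩

lemma pvNU_cons_zero (t : String) (l : List String) :
    pvNU (t :: l) 0 = !(PySem.Str.isIn "_" t) := by simp [pvNU]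

lemma pvMarkB_cons_zero (t : String) (l : List String) (window r : Int) :
    pvMarkB (t :: l) window r 0 =
      (!(decide (PySem.Str.lower t ∈ pvNegStop)) && decide ((0 : Int) < r)) := by
  simp [pvMarkB, pvStop_cons_zero, decide_eq_decide]

lemma pvBGo_eq (window : Int) (toks : List String) (r : Int) (hr : r ≤ window ∨ r ≤ 0) :
    pvBGo window toks r =
      (List.range toks.length).map
        (fun q => if pvMarkB toks window r q && pvNU toks q
                  then "neg_" ++ toks.getD q "" else toks.getD q "") := by
  induction toks generalizing r with
  | nil => simp [pvBGo]
  | cons t l ih =>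
    rw [pvBGo]
    show _ = (List.range (l.length + 1)).map _
    rw [List.range_succ_eq_map, List.map_cons, List.map_map]
    have hside : (if PySem.Str.lower t ∈ pvNegTriggers then window
        else if PySem.Str.lower t ∈ pvNegStop then 0
        else if r > 0 then r - 1 else r) ≤ window ∨
        (if PySem.Str.lower t ∈ pvNegTriggers then window
        else if PySem.Str.lower t ∈ pvNegStop then 0
        else if r > 0 then r - 1 else r) ≤ 0 := by
      split_ifs <;> omega
    have htail : pvBGo window l (if PySem.Str.lower t ∈ pvNegTriggers then window
        else if PySem.Str.lower t ∈ pvNegStop then 0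
        else if r > 0 then r - 1 else r) =
        (List.range l.length).map
          (fun q => if pvMarkB (t :: l) window r (q + 1) && pvNU (t :: l) (q + 1)
                    then "neg_" ++ (t :: l).getD (q + 1) "" else (t :: l).getD (q + 1) "") := by
      rw [ih _ hside]
      apply List.map_congr_left
      intro q _
      rw [pvMarkB_cons t l window r q hr, pvNU_cons_succ, List.getD_cons_succ]
    by_cases hs : PySem.Str.lower t ∈ pvNegStop
    · have htr : ¬ PySem.Str.lower t ∈ pvNegTriggers := fun h => pv_disjoint _ hs h
      simp only [hs, htr, if_true, if_false] at htail ⊢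
      rw [htail]
      simp [pvMarkB_cons_zero, pvNU_cons_zero, hs, Function.comp_def]
    · by_cases htr : PySem.Str.lower t ∈ pvNegTriggers
      · simp only [hs, htr, if_true, if_false] at htail ⊢
        rw [htail]
        by_cases hr0 : r > 0
        · simp [pvMarkB_cons_zero, pvNU_cons_zero, hs, hr0, Function.comp_def]
          by_cases h : PySem.Chars.isIn ['_'] t.toList = true <;> simp [h]
        · simp [pvMarkB_cons_zero, pvNU_cons_zero, hs, hr0, Function.comp_def]
      · simp only [hs, htr, if_true, if_false] at htail ⊢
        by_cases hr0 : r > 0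
        · simp only [hr0, if_true] at htail ⊢
          rw [htail]
          simp [pvMarkB_cons_zero, pvNU_cons_zero, hs, hr0, Function.comp_def]
          by_cases h : PySem.Chars.isIn ['_'] t.toList = true <;> simp [h]
        · simp only [hr0, if_false] at htail ⊢
          rw [htail]
          simp [pvMarkB_cons_zero, pvNU_cons_zero, hs, Function.comp_def]
          omega

-- ===== VERDICT (by name: the statement is the Claim_ definition above) =====
theorem apply_negation_window_py_spec : Claim_equal_apply_negation_window_py := by
  intro tokens window _
  unfold Spec_apply_negation_window_py apply_negation_window_py apply_negation_window_py_alt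
  have hinit : tokens = (List.range tokens.length).map (pvEntry tokens (pvMarkA tokens window 0)) := by
    conv_lhs => rw [pv_self_eq_map_range tokens]
    apply List.map_congr_left
    intro p _
    simp only [pvEntry]
    rw [pvMarkA_zero]
    simp
  rw [pvAOuter_eq tokens window tokens 0 hinit, pvBGo_eq window tokens 0 (Or.inr le_rfl)]
  apply List.map_congr_left
  intro p _
  simp only [pvEntry]
  rw [pvMarkB_zero]
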